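-- pv_equiv track=rewrite | github.com/fastso/learning-python | leetcode_cn/contest/biweekly82_c.py | minSumSquareDiff
-- ===== SOURCE A (Python) =====
-- from typing import List
--
-- def minSumSquareDiff(nums1: List[int], nums2: List[int], k1: int, k2: int) -> int:
--     diff = list()
--     for i in range(len(nums1)):
--         diff.append(abs(nums1[i] - nums2[i]))
--     diff.sort()
--
--     for i in range(len(diff)):
--         if diff[i] >= k1:
--             return diff[i] ** 2
-- ===== SOURCE B (Python) =====
-- def minSumSquareDiff(nums1, nums2, k1, k2):
--     best = None
--     for a, b in zip(nums1, nums2):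
--         d = abs(a - b)
--         if d >= k1 and (best is None or d < best):
--             best = d
--     return None if best is None else best ** 2
-- ===== Notes on version B (the rewrite author's own statement) =====
-- stated objective: faster
-- what changed: B replaces A's sort-then-scan-for-first-qualifying-element with a single linear pass keeping a running minimum of the diffs that are >= k1, squaring it at the end.
import Mathlib
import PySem

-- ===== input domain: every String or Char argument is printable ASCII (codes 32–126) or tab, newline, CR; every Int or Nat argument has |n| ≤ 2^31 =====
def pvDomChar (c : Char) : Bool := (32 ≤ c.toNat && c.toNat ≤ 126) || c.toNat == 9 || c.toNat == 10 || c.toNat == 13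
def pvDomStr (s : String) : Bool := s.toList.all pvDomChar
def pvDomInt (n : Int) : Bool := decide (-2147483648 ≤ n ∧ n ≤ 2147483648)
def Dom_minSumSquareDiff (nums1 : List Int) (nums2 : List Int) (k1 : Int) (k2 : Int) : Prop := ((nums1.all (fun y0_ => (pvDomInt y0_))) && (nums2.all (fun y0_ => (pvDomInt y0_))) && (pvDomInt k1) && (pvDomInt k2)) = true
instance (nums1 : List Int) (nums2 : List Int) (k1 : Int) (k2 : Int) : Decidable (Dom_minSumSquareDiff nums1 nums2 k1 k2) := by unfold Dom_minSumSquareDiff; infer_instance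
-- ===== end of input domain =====

-- B: single linear min-scan over the paired diffs instead of A's sort-then-first-scan; return value equivalence proved on Pre_ (len nums1 ≤ len nums2).


-- ===== PORT A =====
-- second loop of A: scan the sorted list, return the first element ≥ k1 squared
def pvFindSq (k1 : Int) : List Int → Option Int
  | [] => none
  | d :: ds => if d ≥ k1 then some (d ^ 2) else pvFindSq k1 ds

def minSumSquareDiff (nums1 : List Int) (nums2 : List Int) (k1 : Int) (k2 : Int) : Option Int :=
  let diff := (PySem.List.pyRange 0 (nums1.length : Int) 1).foldl
      (fun acc i => acc ++ [|PySem.List.pyGetD nums1 i 0 - PySem.List.pyGetD nums2 i 0|]) []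
  let diff := PySem.List.sorted diff (fun x => x) false
  pvFindSq k1 diff

-- ===== PORT B =====
def minSumSquareDiff_alt (nums1 : List Int) (nums2 : List Int) (k1 : Int) (k2 : Int) : Option Int :=
  let best := (nums1.zip nums2).foldl
    (fun best p =>
      let d := |p.1 - p.2|
      match best with
      | none => if d ≥ k1 then some d else none
      | some b => if d ≥ k1 ∧ d < b then some d else some b) none
  match best with
  | none => none
  | some b => some (b ^ 2)

-- ===== PRECONDITION & SPEC =====
-- A indexes nums2[i] for every i < len(nums1), so it raises IndexError iff nums2 is shorter than nums1.
def Pre_minSumSquareDiff (nums1 : List Int) (nums2 : List Int) (k1 : Int) (k2 : Int) : Prop :=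
  nums1.length ≤ nums2.length
instance (nums1 : List Int) (nums2 : List Int) (k1 : Int) (k2 : Int) : Decidable (Pre_minSumSquareDiff nums1 nums2 k1 k2) := by unfold Pre_minSumSquareDiff; infer_instance
def pvWitness_minSumSquareDiff : List Int × List Int × Int × Int := ([1, 5, 9], [2, 2, 2], 3, 0)

def Spec_minSumSquareDiff (nums1 : List Int) (nums2 : List Int) (k1 : Int) (k2 : Int) (out : Option Int) : Prop := out = minSumSquareDiff_alt nums1 nums2 k1 k2
instance (nums1 : List Int) (nums2 : List Int) (k1 : Int) (k2 : Int) (out : Option Int) : Decidable (Spec_minSumSquareDiff nums1 nums2 k1 k2 out) := by unfold Spec_minSumSquareDiff; infer_instance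

-- ===== CLAIM (what is proved, stated in full; the proofs are below) =====
def Claim_equal_minSumSquareDiff : Prop := ∀ (nums1 : List Int) (nums2 : List Int) (k1 : Int) (k2 : Int), Dom_minSumSquareDiff nums1 nums2 k1 k2 → Pre_minSumSquareDiff nums1 nums2 k1 k2 → Spec_minSumSquareDiff nums1 nums2 k1 k2 (minSumSquareDiff nums1 nums2 k1 k2)

-- ===== LEMMAS AND PROOFS =====

-- the index-loop diff list equals the map over the zipped lists
theorem pv_diff_eq_zip : ∀ (xs ys : List Int), xs.length ≤ ys.length →
    (List.range xs.length).map (fun k => |xs.getD k 0 - ys.getD k 0|)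
      = (xs.zip ys).map (fun p => |p.1 - p.2|) := by
  intro xs
  induction xs with
  | nil => intro ys _; simp
  | cons x xs ih =>
    intro ys h
    cases ys with
    | nil => simp at h
    | cons y ys =>
      simp only [List.length_cons, List.range_succ_eq_map, List.map_cons, List.map_map,
        List.zip_cons_cons, List.getD_cons_zero]
      congr 1
      simp only [Function.comp_def, List.getD_cons_succ]
      exact ih ys (by simpa using h)

-- pvFindSq is find-first-qualifying, squared
theorem pvFindSq_eq_find? (k : Int) : ∀ (s : List Int),
    pvFindSq k s = (s.find? (fun d => decide (d ≥ k))).map (fun d => d ^ 2) := by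
  intro s
  induction s with
  | nil => simp [pvFindSq]
  | cons d ds ih =>
    by_cases h : d ≥ k
    · simp [pvFindSq, h, List.find?]
    · simp [pvFindSq, h, List.find?, ih]

-- find? on a ≤-sorted list gives the minimum qualifying element
theorem foldl_min_eq_self (a : Int) : ∀ (t : List Int), (∀ x ∈ t, a ≤ x) → t.foldl min a = a := by
  intro t
  induction t generalizing a with
  | nil => intro _; rfl
  | cons b t ih =>
    intro h
    have hab : min a b = a := min_eq_left (h b (by simp))
    simp only [List.foldl_cons, hab]
    exact ih a (fun x hx => h x (by simp [hx]))

theorem head?_eq_min?_of_pairwise (t : List Int) (h : t.Pairwise (· ≤ ·)) :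
    t.head? = t.min? := by
  cases t with
  | nil => rfl
  | cons a r =>
    have ha : ∀ x ∈ r, a ≤ x := (List.pairwise_cons.mp h).1
    rw [List.min?_cons', foldl_min_eq_self a r ha]
    rfl

theorem min?_eq_of_perm (t t' : List Int) (h : t.Perm t') : t.min? = t'.min? := by
  cases ht : t.min? with
  | none =>
    rw [List.min?_eq_none_iff] at ht
    subst ht
    rw [List.perm_nil.mp h.symm]
    rfl
  | some m =>
    rw [List.min?_eq_some_iff] at ht
    symm
    rw [List.min?_eq_some_iff]
    exact ⟨h.mem_iff.mp ht.1, fun b hb => ht.2 b (h.mem_iff.mpr hb)⟩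

-- helper: min distributes over foldl min
theorem min_foldl_min (x : Int) : ∀ (t : List Int) (a : Int),
    min x (t.foldl min a) = t.foldl min (min x a) := by
  intro t
  induction t with
  | nil => intro a; rfl
  | cons b t ih =>
    intro a
    simp only [List.foldl_cons]
    rw [ih (min a b), min_assoc]

-- B's accumulator step as a function
def pvStep (k : Int) (best : Option Int) (d : Int) : Option Int :=
  match best with
  | none => if d ≥ k then some d else none
  | some b => if d ≥ k ∧ d < b then some d else some b

def pvOmin : Option Int → Option Int → Option Int
  | none, o => o
  | some b, none => some b
  | some b, some m => some (min b m)

theorem omin_some_min? (k x : Int) (t : List Int) :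
    pvOmin (some x) (t.filter (fun d => decide (d ≥ k))).min?
      = some ((t.filter (fun d => decide (d ≥ k))).foldl min x) := by
  cases hf : t.filter (fun d => decide (d ≥ k)) with
  | nil => simp [pvOmin]
  | cons a r =>
    rw [List.min?_cons', List.foldl_cons]
    show some (min x (r.foldl min a)) = some (r.foldl min (min x a))
    rw [min_foldl_min]

theorem foldl_step_eq (k : Int) : ∀ (l : List Int) (acc : Option Int),
    l.foldl (pvStep k) acc = pvOmin acc (l.filter (fun d => decide (d ≥ k))).min? := by
  intro l
  induction l with
  | nil => intro acc; cases acc <;> simp [pvOmin]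
  | cons d ds ih =>
    intro acc
    by_cases hd : d ≥ k
    · have hf : (d :: ds).filter (fun d => decide (d ≥ k)) = d :: ds.filter (fun d => decide (d ≥ k)) := by
        simp [List.filter, hd]
      rw [hf]
      cases acc with
      | none =>
        have hstep : pvStep k none d = some d := by simp [pvStep, hd]
        rw [List.foldl_cons, hstep, ih, omin_some_min? k d ds]
        show _ = pvOmin none (d :: _).min?
        rw [List.min?_cons']
        rfl
      | some b =>
        have hstep : pvStep k (some b) d = some (min b d) := by
          by_cases hlt : d < b
          · simp [pvStep, hd, hlt, min_eq_right (le_of_lt hlt)]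
          · simp [pvStep, hd, hlt, min_eq_left (le_of_not_gt hlt)]
        rw [List.foldl_cons, hstep, ih, omin_some_min? k (min b d) ds]
        show _ = pvOmin (some b) (d :: _).min?
        rw [List.min?_cons']
        show some _ = some (min b ((ds.filter _).foldl min d))
        rw [min_foldl_min, ← min_foldl_min]
    · have hf : (d :: ds).filter (fun d => decide (d ≥ k)) = ds.filter (fun d => decide (d ≥ k)) := by
        simp [List.filter, hd]
      have hstep : pvStep k acc d = acc := by
        cases acc <;> simp [pvStep, hd]
      rw [hf, List.foldl_cons, hstep, ih]

-- find-first is head-of-filter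
theorem pv_find?_eq_head?_filter (p : Int → Bool) : ∀ (s : List Int),
    s.find? p = (s.filter p).head? := by
  intro s
  induction s with
  | nil => rfl
  | cons a r ih =>
    cases h : p a with
    | true => rw [List.find?_cons_of_pos h, List.filter_cons_of_pos h, List.head?_cons]
    | false =>
      rw [List.find?_cons_of_neg (by simp [h]), List.filter_cons_of_neg (by simp [h]), ih]

-- find? on sorted l equals min? of the filter of l
theorem find?_sorted_eq_min?_filter (k : Int) (l : List Int) :
    (PySem.List.sorted l (fun x => x) false).find? (fun d => decide (d ≥ k))
      = (l.filter (fun d => decide (d ≥ k))).min? := by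
  set s := PySem.List.sorted l (fun x => x) false with hs
  have hperm : s.Perm l := PySem.List.sorted_perm l (fun x => x) false
  have hpw : s.Pairwise (· ≤ ·) := PySem.List.sorted_pairwise l (fun x => x)
  rw [pv_find?_eq_head?_filter]
  rw [head?_eq_min?_of_pairwise _ (hpw.filter _)]
  exact min?_eq_of_perm _ _ (hperm.filter _)

-- ===== VERDICT (by name: the statement is the Claim_ definition above) =====
theorem minSumSquareDiff_spec : Claim_equal_minSumSquareDiff := by
  intro nums1 nums2 k1 k2 _ hpre
  unfold Spec_minSumSquareDiff minSumSquareDiff minSumSquareDiff_alt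
  have hdiff : (PySem.List.pyRange 0 (nums1.length : Int) 1).foldl
      (fun acc i => acc ++ [|PySem.List.pyGetD nums1 i 0 - PySem.List.pyGetD nums2 i 0|]) []
      = (nums1.zip nums2).map (fun p => |p.1 - p.2|) := by
    rw [PySem.List.foldl_append_singleton_eq_map, List.nil_append,
      PySem.List.pyRange_zero_natCast, List.map_map]
    have : ((fun i => |PySem.List.pyGetD nums1 i 0 - PySem.List.pyGetD nums2 i 0|) ∘ (Int.ofNat))
        = fun k => |nums1.getD k 0 - nums2.getD k 0| := by
      funext k
      simp [Function.comp, PySem.List.pyGetD_natCast]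
    rw [show ((fun k : Nat => (k : Int))) = Int.ofNat from rfl, this,
      pv_diff_eq_zip nums1 nums2 hpre]
  simp only [hdiff]
  rw [pvFindSq_eq_find?, find?_sorted_eq_min?_filter]
  have hB : (nums1.zip nums2).foldl
      (fun best p =>
        let d := |p.1 - p.2|
        match best with
        | none => if d ≥ k1 then some d else none
        | some b => if d ≥ k1 ∧ d < b then some d else some b) none
      = ((nums1.zip nums2).map (fun p => |p.1 - p.2|)).foldl (pvStep k1) none := by
    rw [List.foldl_map]
    rfl
  rw [hB, foldl_step_eq]
  cases ((nums1.zip nums2).map (fun p => |p.1 - p.2|)).filter (fun d => decide (d ≥ k1)) |>.min? with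
  | none => rfl
  | some m => rfl
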